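-- pv_equiv track=rewrite | github.com/tracker22/LAB2 | task1.py | nulls
-- ===== SOURCE A (Python) =====
-- def nulls(s, i):
--     while i < len(s) and s[i] == '0':
--         if i + 1 < len(s) and s[i+1] == '1':
--             return i + 1
--         elif i + 1 < len(s) and s[i+1] != '0':
--             return 0
--         i += 1
--     return 0
-- ===== SOURCE B (Python) =====
-- def nulls(s, i):
--     t = s[i:]
--     z = len(t) - len(t.lstrip('0'))
--     if 0 < z < len(t) and t[z] == '1':
--         return i + z
--     return 0
-- ===== Notes on version B (the rewrite author's own statement) =====
-- stated objective: simpler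
-- what changed: B has no index loop at all: it takes the suffix s[i:], counts its leading zeros with lstrip, and decides with one arithmetic check on the boundary character, instead of A's while loop that inspects each character's successor inline.
-- intended difference: For negative i whose zero run reaches the end of the string, A's i+1 lookahead wraps to index 0 and rescans the leading zeros of the string, returning the index of a '1' after them (e.g. 1 on ('010', -1)), while B returns 0 because the run at i ends without a following '1', which is the intended value. — e.g. on nulls("010", -1): A returns 1, B returns 0
-- outside the precondition, e.g. on nulls('00', -3): A raises IndexError, B returns 0
import Mathlib
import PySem

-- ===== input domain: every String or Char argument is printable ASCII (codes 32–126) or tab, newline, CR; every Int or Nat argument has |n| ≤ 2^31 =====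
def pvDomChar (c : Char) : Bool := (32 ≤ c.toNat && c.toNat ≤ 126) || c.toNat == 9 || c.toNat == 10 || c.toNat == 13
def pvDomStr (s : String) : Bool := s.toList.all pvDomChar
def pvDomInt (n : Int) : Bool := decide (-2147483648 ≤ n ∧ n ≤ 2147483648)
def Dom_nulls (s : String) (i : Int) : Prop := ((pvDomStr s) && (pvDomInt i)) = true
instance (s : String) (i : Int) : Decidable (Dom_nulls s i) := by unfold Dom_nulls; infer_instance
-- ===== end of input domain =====

-- B is loop-free: it takes the suffix s[i:], counts its leading zeros with lstrip, and
-- inspects the single boundary character (objective: simpler). On negative i whose zero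
-- run reaches the end of the string A's i+1 lookahead wraps to index 0; that intended
-- difference is stated as D_nulls below.

-- ===== PORT A =====
-- the while loop of A: scans from i while s[i]=='0', checking s[i+1] inline each step
def nulls_loop (cs : List Char) (i : Int) : Int :=
  if _h : i < (cs.length : Int) then
    match PySem.List.pyGet? cs i with
    | none => 0   -- IndexError in Python (outside Pre_)
    | some c =>
      if c = '0' then
        if i + 1 < (cs.length : Int) then
          match PySem.List.pyGet? cs (i + 1) with
          | none => 0   -- IndexError in Python (unreachable once s[i] succeeded)
          | some c' =>
            if c' = '1' then i + 1
            else if c' ≠ '0' then 0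
            else nulls_loop cs (i + 1)
        else nulls_loop cs (i + 1)
      else 0
  else 0
termination_by ((cs.length : Int) - i).toNat
decreasing_by all_goals omega

def nulls (s : String) (i : Int) : Int := nulls_loop s.toList i

-- ===== PORT B =====
-- body of Source B on the code points of t = s[i:]: z = len(t) - len(t.lstrip('0')), then the
-- boundary check; t.lstrip('0') is ported by hand as t.dropWhile (· == '0'), which is exact
-- for lstrip with the single-character argument '0'.
def nulls_altF (t : List Char) (i : Int) : Int :=
  let z : Int := (t.length : Int) - ((t.dropWhile (· == '0')).length : Int)
  if 0 < z ∧ z < (t.length : Int) ∧ PySem.List.pyGet? t z = some '1' then i + z else 0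

def nulls_alt (s : String) (i : Int) : Int :=
  nulls_altF (PySem.List.slice s.toList (some i) none) i

-- ===== PRECONDITION & SPEC =====
-- Pre_ excludes exactly the inputs where Python's s[i] raises IndexError: i < -len(s).
def Pre_nulls (s : String) (i : Int) : Prop :=
  -(s.toList.length : Int) ≤ i ∨ (s.toList.length : Int) ≤ i
instance (s : String) (i : Int) : Decidable (Pre_nulls s i) := by unfold Pre_nulls; infer_instance
def pvWitness_nulls : String × Int := ("001x", 0)

-- For negative i whose zero run reaches the end of the string, A's i+1 lookahead wraps to
-- index 0 and rescans the leading zeros of the string, returning the index of a '1' after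
-- them, while B returns 0 because the run at i ends without a following '1' (the intended value).
def D_nulls (s : String) (i : Int) : Prop :=
  -(s.toList.length : Int) ≤ i ∧ i < 0 ∧
  ((s.toList.drop ((s.toList.length : Int) + i).toNat).all (· == '0') = true ∧
   0 < (s.toList.takeWhile (· == '0')).length ∧
   (s.toList.takeWhile (· == '0')).length < s.toList.length ∧
   s.toList[(s.toList.takeWhile (· == '0')).length]? = some '1')
instance (s : String) (i : Int) : Decidable (D_nulls s i) := by unfold D_nulls; infer_instance

def Spec_nulls (s : String) (i : Int) (out : Int) : Prop := ¬ D_nulls s i → out = nulls_alt s i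
instance (s : String) (i : Int) (out : Int) : Decidable (Spec_nulls s i out) := by unfold Spec_nulls; infer_instance

def pvDiffWitness_nulls : String × Int := ("010", -1)
def pvDiffWitnessOut_nulls : Int × Int := (1, 0)

-- ===== CLAIM (what is proved, stated in full; the proofs are below) =====
def Claim_unchanged_nulls : Prop := ∀ (s : String) (i : Int), Dom_nulls s i → Pre_nulls s i → Spec_nulls s i (nulls s i)
def Claim_changed_nulls : Prop := Dom_nulls (pvDiffWitness_nulls.1) (pvDiffWitness_nulls.2) ∧ Pre_nulls (pvDiffWitness_nulls.1) (pvDiffWitness_nulls.2) ∧ D_nulls (pvDiffWitness_nulls.1) (pvDiffWitness_nulls.2) ∧ nulls (pvDiffWitness_nulls.1) (pvDiffWitness_nulls.2) = pvDiffWitnessOut_nulls.1 ∧ nulls_alt (pvDiffWitness_nulls.1) (pvDiffWitness_nulls.2) = pvDiffWitnessOut_nulls.2 ∧ pvDiffWitnessOut_nulls.1 ≠ pvDiffWitnessOut_nulls.2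
def Claim_exact_nulls : Prop := ∀ (s : String) (i : Int), Dom_nulls s i → Pre_nulls s i → D_nulls s i → nulls s i ≠ nulls_alt s i

-- ===== LEMMAS AND PROOFS =====

-- pyGet? at a nonnegative in-range index
lemma pyGet?_pos (cs : List Char) (i : Int) (h0 : 0 ≤ i) (h : i < (cs.length : Int)) :
    PySem.List.pyGet? cs i = cs[i.toNat]? := by
  simp only [PySem.List.pyGet?, PySem.List.pyIdx?]
  rw [if_pos h0, if_pos h]; rfl

-- pyGet? at a negative in-range index
lemma pyGet?_neg (cs : List Char) (i : Int) (hlo : -(cs.length : Int) ≤ i) (hhi : i < 0) :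
    PySem.List.pyGet? cs i = cs[((cs.length : Int) + i).toNat]? := by
  simp only [PySem.List.pyGet?, PySem.List.pyIdx?]
  rw [if_neg (by omega : ¬ (0:Int) ≤ i), if_pos hlo]
  simp only [Option.bind_some]
  congr 1; omega

lemma clamp_neg (cs : List Char) (i : Int) (hlo : -(cs.length : Int) ≤ i) (hhi : i < 0) :
    PySem.List.clampIdx cs.length i = ((cs.length : Int) + i).toNat := by
  simp only [PySem.List.clampIdx]
  rw [if_pos hhi, if_neg (by omega : ¬ (cs.length : Int) + i < 0)]

lemma drop_cons_of_get? (cs : List Char) (k : Nat) (c : Char) (h : cs[k]? = some c) :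
    cs.drop k = c :: cs.drop (k + 1) := by
  obtain ⟨hk, hc⟩ := List.getElem?_eq_some_iff.mp h
  rw [List.drop_eq_getElem_cons hk, hc]

-- the z of nulls_altF is the leading-'0' count
lemma z_takeWhile (t : List Char) :
    (t.length : Int) - ((t.dropWhile (· == '0')).length : Int)
      = ((t.takeWhile (· == '0')).length : Int) := by
  have h := congrArg List.length (List.takeWhile_append_dropWhile (p := (· == '0')) (l := t))
  simp only [List.length_append] at h
  omega

lemma altF_eval (t : List Char) (i : Int) :
    nulls_altF t i =
      if 0 < (t.takeWhile (· == '0')).length ∧ (t.takeWhile (· == '0')).length < t.length ∧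
          t[(t.takeWhile (· == '0')).length]? = some '1'
      then i + (t.takeWhile (· == '0')).length else 0 := by
  have hz := z_takeWhile t
  simp only [nulls_altF, hz]
  by_cases h1 : 0 < (t.takeWhile (· == '0')).length
  · have hget : PySem.List.pyGet? t ((t.takeWhile (· == '0')).length : Int)
        = t[(t.takeWhile (· == '0')).length]? := by
      simpa using PySem.List.pyGet?_natCast t (t.takeWhile (· == '0')).length
    rw [hget]
    split_ifs with ha hb hb
    · rfl
    · exact absurd ⟨by exact_mod_cast ha.1, by exact_mod_cast ha.2.1, ha.2.2⟩ hb
    · exact absurd ⟨by exact_mod_cast hb.1, by exact_mod_cast hb.2.1, hb.2.2⟩ ha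
    · rfl
  · have hz0 : (t.takeWhile (· == '0')).length = 0 := by omega
    simp [hz0]

lemma altF_nil (i : Int) : nulls_altF [] i = 0 := by
  simp [altF_eval]

lemma altF_head_ne (c : Char) (t : List Char) (i : Int) (hc : ¬ c = '0') :
    nulls_altF (c :: t) i = 0 := by
  rw [altF_eval]
  simp [hc]

lemma altF_single (i : Int) : nulls_altF ['0'] i = 0 := by
  rw [altF_eval]; simp

lemma altF_zero_one (t : List Char) (i : Int) :
    nulls_altF ('0' :: '1' :: t) i = i + 1 := by
  rw [altF_eval]
  simp

lemma altF_zero_other (c' : Char) (t : List Char) (i : Int) (h1 : ¬ c' = '1') (h0 : ¬ c' = '0') :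
    nulls_altF ('0' :: c' :: t) i = 0 := by
  rw [altF_eval]
  simp [h0, h1]

lemma altF_shift (t : List Char) (i : Int) :
    nulls_altF ('0' :: '0' :: t) i = nulls_altF ('0' :: t) (i + 1) := by
  rw [altF_eval, altF_eval]
  simp only [List.takeWhile_cons, beq_self_eq_true, if_true, List.length_cons,
    List.getElem?_cons_succ]
  have hle : (t.takeWhile (· == '0')).length ≤ t.length :=
    List.Sublist.length_le (List.takeWhile_sublist _)
  split_ifs with ha hb hb
  · push_cast; omega
  · obtain ⟨a1, a2, a3⟩ := ha; exact absurd ⟨by omega, by omega, a3⟩ hb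
  · obtain ⟨b1, b2, b3⟩ := hb; exact absurd ⟨by omega, by omega, b3⟩ ha
  · rfl

lemma altF_all_zero (t : List Char) (i : Int) (h : t.all (· == '0') = true) :
    nulls_altF t i = 0 := by
  rw [altF_eval]
  have ht : t.takeWhile (· == '0') = t := by
    rw [List.takeWhile_eq_self_iff]; simpa using h
  rw [ht]
  simp

-- the loop from a nonnegative index equals B's formula on the suffix
lemma pos_eq (cs : List Char) (i : Int) :
    0 ≤ i → nulls_loop cs i = nulls_altF (cs.drop i.toNat) i := by
  induction i using nulls_loop.induct cs with
  | case1 i hlt hg =>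
    intro h0
    rw [pyGet?_pos cs i h0 hlt] at hg
    have := List.getElem?_eq_none_iff.mp hg
    omega
  | case2 i hlt hlt1 hg1 hg =>
    intro h0
    rw [pyGet?_pos cs (i+1) (by omega) hlt1] at hg1
    have := List.getElem?_eq_none_iff.mp hg1
    omega
  | case3 i hlt hlt1 hg hg1 =>
    intro h0
    have e1 : (i+1).toNat = i.toNat + 1 := by omega
    have h1 : cs.drop i.toNat = '0' :: cs.drop (i.toNat + 1) :=
      drop_cons_of_get? cs i.toNat '0' (by rw [← pyGet?_pos cs i h0 hlt]; exact hg)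
    have h2 : cs.drop (i.toNat + 1) = '1' :: cs.drop (i.toNat + 2) :=
      drop_cons_of_get? cs (i.toNat + 1) '1'
        (by rw [← e1, ← pyGet?_pos cs (i+1) (by omega) hlt1]; exact hg1)
    rw [nulls_loop]
    simp only [hlt, hg, hlt1, dif_pos, if_true, hg1, if_pos rfl]
    rw [h1, h2, altF_zero_one]
  | case4 i hlt hlt1 c' hg1 hc1 hc0 hg =>
    intro h0
    have e1 : (i+1).toNat = i.toNat + 1 := by omega
    have h1 : cs.drop i.toNat = '0' :: cs.drop (i.toNat + 1) :=
      drop_cons_of_get? cs i.toNat '0' (by rw [← pyGet?_pos cs i h0 hlt]; exact hg)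
    have h2 : cs.drop (i.toNat + 1) = c' :: cs.drop (i.toNat + 2) :=
      drop_cons_of_get? cs (i.toNat + 1) c'
        (by rw [← e1, ← pyGet?_pos cs (i+1) (by omega) hlt1]; exact hg1)
    rw [nulls_loop]
    simp only [hlt, hg, hlt1, dif_pos, if_true, hg1, hc1, hc0, if_false]
    rw [h1, h2, altF_zero_other c' _ i hc1 (by simpa using hc0)]
    simp [hc1, hc0]
  | case5 i hlt hlt1 c' hg1 hc1 hc0 hg ih =>
    intro h0
    simp only [ne_eq, not_not] at hc0
    subst hc0
    have e1 : (i+1).toNat = i.toNat + 1 := by omega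
    have h1 : cs.drop i.toNat = '0' :: cs.drop (i.toNat + 1) :=
      drop_cons_of_get? cs i.toNat '0' (by rw [← pyGet?_pos cs i h0 hlt]; exact hg)
    have h2 : cs.drop (i.toNat + 1) = '0' :: cs.drop (i.toNat + 2) :=
      drop_cons_of_get? cs (i.toNat + 1) '0'
        (by rw [← e1, ← pyGet?_pos cs (i+1) (by omega) hlt1]; exact hg1)
    rw [nulls_loop]
    simp only [hlt, hg, hlt1, dif_pos, if_true, hg1]
    rw [if_neg (by decide), if_neg (by simp), ih (by omega), e1, h1, h2, altF_shift]
  | case6 i hlt hlt1 hg ih =>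
    intro h0
    have e1 : (i+1).toNat = cs.length := by omega
    have h1 : cs.drop i.toNat = '0' :: cs.drop (i.toNat + 1) :=
      drop_cons_of_get? cs i.toNat '0' (by rw [← pyGet?_pos cs i h0 hlt]; exact hg)
    have h2 : cs.drop (i.toNat + 1) = [] := List.drop_eq_nil_of_le (by omega)
    rw [nulls_loop]
    simp only [hlt, hg, hlt1, dif_pos, if_true, if_false]
    rw [ih (by omega), e1, List.drop_length, altF_nil, h1, h2, altF_single]
  | case7 i hlt c hg hc =>
    intro h0
    have h1 : cs.drop i.toNat = c :: cs.drop (i.toNat + 1) :=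
      drop_cons_of_get? cs i.toNat c (by rw [← pyGet?_pos cs i h0 hlt]; exact hg)
    rw [nulls_loop]
    simp only [hlt, hg, hc, dif_pos, if_false]
    rw [h1, altF_head_ne c _ i hc]
  | case8 i hlt =>
    intro h0
    have h1 : cs.drop i.toNat = [] := List.drop_eq_nil_of_le (by omega)
    rw [nulls_loop]
    simp only [hlt, dif_neg, not_false_iff]
    rw [h1, altF_nil]

-- the last four conjuncts of D_nulls, on the code-point list
def Dl (cs : List Char) (i : Int) : Prop :=
  (cs.drop ((cs.length : Int) + i).toNat).all (· == '0') = true ∧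
  0 < (cs.takeWhile (· == '0')).length ∧
  (cs.takeWhile (· == '0')).length < cs.length ∧
  cs[(cs.takeWhile (· == '0')).length]? = some '1'

lemma D_iff (s : String) (i : Int) :
    D_nulls s i ↔ (-(s.toList.length : Int) ≤ i ∧ i < 0 ∧ Dl s.toList i) := Iff.rfl

lemma head_zero_of_takeWhile_pos (cs : List Char)
    (h : 0 < (cs.takeWhile (· == '0')).length) : cs[0]? = some '0' := by
  cases cs with
  | nil => simp at h
  | cons c tl =>
    by_cases hc : c = '0'
    · subst hc; simp
    · simp [List.takeWhile_cons, hc] at h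

-- the loop from a negative in-range index, outside the wrap region D
lemma neg_nD (cs : List Char) (i : Int) :
    -(cs.length : Int) ≤ i → i < 0 → ¬ Dl cs i →
    nulls_loop cs i = nulls_altF (cs.drop ((cs.length : Int) + i).toNat) i := by
  induction i using nulls_loop.induct cs with
  | case1 i hlt hg =>
    intro hlo hhi _
    rw [pyGet?_neg cs i hlo hhi] at hg
    have := List.getElem?_eq_none_iff.mp hg
    omega
  | case2 i hlt hlt1 hg1 hg =>
    intro hlo hhi _
    by_cases h1 : i + 1 < 0
    · rw [pyGet?_neg cs (i+1) (by omega) h1] at hg1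
      have := List.getElem?_eq_none_iff.mp hg1
      omega
    · rw [pyGet?_pos cs (i+1) (by omega) hlt1] at hg1
      have := List.getElem?_eq_none_iff.mp hg1
      omega
  | case3 i hlt hlt1 hg hg1 =>
    intro hlo hhi _
    have h1 : cs.drop ((cs.length : Int) + i).toNat
        = '0' :: cs.drop (((cs.length : Int) + i).toNat + 1) :=
      drop_cons_of_get? _ _ _ (by rw [← pyGet?_neg cs i hlo hhi]; exact hg)
    by_cases hneg : i + 1 < 0
    · have e1 : ((cs.length : Int) + (i+1)).toNat = ((cs.length : Int) + i).toNat + 1 := by omega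
      have h2 : cs.drop (((cs.length : Int) + i).toNat + 1)
          = '1' :: cs.drop (((cs.length : Int) + i).toNat + 2) :=
        drop_cons_of_get? _ _ _
          (by rw [← e1, ← pyGet?_neg cs (i+1) (by omega) hneg]; exact hg1)
      rw [nulls_loop]
      simp only [hlt, hg, hlt1, dif_pos, if_true, hg1, if_pos rfl]
      rw [h1, h2, altF_zero_one]
    · have hi1 : i = -1 := by omega
      have h2 : cs.drop (((cs.length : Int) + i).toNat + 1) = [] :=
        List.drop_eq_nil_of_le (by omega)
      rw [nulls_loop]
      simp only [hlt, hg, hlt1, dif_pos, if_true, hg1, if_pos rfl]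
      rw [h1, h2, altF_single]
      omega
  | case4 i hlt hlt1 c' hg1 hc1 hc0 hg =>
    intro hlo hhi _
    have h1 : cs.drop ((cs.length : Int) + i).toNat
        = '0' :: cs.drop (((cs.length : Int) + i).toNat + 1) :=
      drop_cons_of_get? _ _ _ (by rw [← pyGet?_neg cs i hlo hhi]; exact hg)
    rw [nulls_loop]
    simp only [hlt, hg, hlt1, dif_pos, if_true, hg1, hc1, hc0, if_false]
    by_cases hneg : i + 1 < 0
    · have e1 : ((cs.length : Int) + (i+1)).toNat = ((cs.length : Int) + i).toNat + 1 := by omega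
      have h2 : cs.drop (((cs.length : Int) + i).toNat + 1)
          = c' :: cs.drop (((cs.length : Int) + i).toNat + 2) :=
        drop_cons_of_get? _ _ _
          (by rw [← e1, ← pyGet?_neg cs (i+1) (by omega) hneg]; exact hg1)
      rw [h1, h2, altF_zero_other c' _ i hc1 (by simpa using hc0)]
      simp [hc1, hc0]
    · have h2 : cs.drop (((cs.length : Int) + i).toNat + 1) = [] :=
        List.drop_eq_nil_of_le (by omega)
      rw [h1, h2, altF_single]
      simp [hc1, hc0]
  | case5 i hlt hlt1 c' hg1 hc1 hc0 hg ih =>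
    intro hlo hhi hnd
    simp only [ne_eq, not_not] at hc0
    subst hc0
    have h1 : cs.drop ((cs.length : Int) + i).toNat
        = '0' :: cs.drop (((cs.length : Int) + i).toNat + 1) :=
      drop_cons_of_get? _ _ _ (by rw [← pyGet?_neg cs i hlo hhi]; exact hg)
    rw [nulls_loop]
    simp only [hlt, hg, hlt1, dif_pos, if_true, hg1]
    rw [if_neg (by decide), if_neg (by simp)]
    by_cases hneg : i + 1 < 0
    · have e1 : ((cs.length : Int) + (i+1)).toNat = ((cs.length : Int) + i).toNat + 1 := by omega
      have h2 : cs.drop (((cs.length : Int) + i).toNat + 1)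
          = '0' :: cs.drop (((cs.length : Int) + i).toNat + 2) :=
        drop_cons_of_get? _ _ _
          (by rw [← e1, ← pyGet?_neg cs (i+1) (by omega) hneg]; exact hg1)
      have hnd1 : ¬ Dl cs (i+1) := by
        intro hd
        apply hnd
        refine ⟨?_, hd.2⟩
        rw [h1]
        simp only [List.all_cons, Bool.and_eq_true, beq_self_eq_true, true_and]
        rw [← e1]
        exact hd.1
      rw [ih (by omega) hneg hnd1, e1, h1, h2, altF_shift]
    · have hi1 : i = -1 := by omega
      have h2 : cs.drop (((cs.length : Int) + i).toNat + 1) = [] :=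
        List.drop_eq_nil_of_le (by omega)
      have hall : (cs.drop ((cs.length : Int) + i).toNat).all (· == '0') = true := by
        rw [h1, h2]; decide
      have he0 : i + 1 = 0 := by omega
      rw [he0, pos_eq cs 0 (by omega)]
      simp only [Int.toNat_zero, List.drop_zero]
      rw [altF_eval, if_neg (fun hL => hnd ⟨hall, hL⟩), h1, h2, altF_single]
  | case6 i hlt hlt1 hg ih =>
    intro hlo hhi _
    omega
  | case7 i hlt c hg hc =>
    intro hlo hhi _
    have h1 : cs.drop ((cs.length : Int) + i).toNat
        = c :: cs.drop (((cs.length : Int) + i).toNat + 1) :=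
      drop_cons_of_get? _ _ _ (by rw [← pyGet?_neg cs i hlo hhi]; exact hg)
    rw [nulls_loop]
    simp only [hlt, hg, hc, dif_pos, if_false]
    rw [h1, altF_head_ne c _ i hc]
  | case8 i hlt =>
    intro hlo hhi _
    omega

-- the loop from a negative in-range index, inside the wrap region D: it returns the
-- leading-zero count of the whole string
lemma neg_D (cs : List Char) (i : Int) :
    -(cs.length : Int) ≤ i → i < 0 → Dl cs i →
    nulls_loop cs i = ((cs.takeWhile (· == '0')).length : Int) := by
  induction i using nulls_loop.induct cs with
  | case1 i hlt hg =>
    intro hlo hhi _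
    rw [pyGet?_neg cs i hlo hhi] at hg
    have := List.getElem?_eq_none_iff.mp hg
    omega
  | case2 i hlt hlt1 hg1 hg =>
    intro hlo hhi _
    by_cases h1 : i + 1 < 0
    · rw [pyGet?_neg cs (i+1) (by omega) h1] at hg1
      have := List.getElem?_eq_none_iff.mp hg1
      omega
    · rw [pyGet?_pos cs (i+1) (by omega) hlt1] at hg1
      have := List.getElem?_eq_none_iff.mp hg1
      omega
  | case3 i hlt hlt1 hg hg1 =>
    intro hlo hhi hd
    exfalso
    by_cases hneg : i + 1 < 0
    · have e1 : ((cs.length : Int) + (i+1)).toNat = ((cs.length : Int) + i).toNat + 1 := by omega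
      rw [pyGet?_neg cs (i+1) (by omega) hneg, e1] at hg1
      have h1 : cs.drop ((cs.length : Int) + i).toNat
          = '0' :: cs.drop (((cs.length : Int) + i).toNat + 1) :=
        drop_cons_of_get? _ _ _ (by rw [← pyGet?_neg cs i hlo hhi]; exact hg)
      have h2 : cs.drop (((cs.length : Int) + i).toNat + 1)
          = '1' :: cs.drop (((cs.length : Int) + i).toNat + 2) :=
        drop_cons_of_get? _ _ _ hg1
      have := hd.1
      rw [h1, h2] at this
      simp at this
    · have he0 : i + 1 = 0 := by omega
      rw [he0, pyGet?_pos cs 0 (by omega) (by omega)] at hg1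
      simp only [Int.toNat_zero] at hg1
      have := head_zero_of_takeWhile_pos cs hd.2.1
      rw [this] at hg1
      simp at hg1
  | case4 i hlt hlt1 c' hg1 hc1 hc0 hg =>
    intro hlo hhi hd
    exfalso
    by_cases hneg : i + 1 < 0
    · have e1 : ((cs.length : Int) + (i+1)).toNat = ((cs.length : Int) + i).toNat + 1 := by omega
      rw [pyGet?_neg cs (i+1) (by omega) hneg, e1] at hg1
      have h1 : cs.drop ((cs.length : Int) + i).toNat
          = '0' :: cs.drop (((cs.length : Int) + i).toNat + 1) :=
        drop_cons_of_get? _ _ _ (by rw [← pyGet?_neg cs i hlo hhi]; exact hg)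
      have h2 : cs.drop (((cs.length : Int) + i).toNat + 1)
          = c' :: cs.drop (((cs.length : Int) + i).toNat + 2) :=
        drop_cons_of_get? _ _ _ hg1
      have := hd.1
      rw [h1, h2] at this
      simp only [List.all_cons, Bool.and_eq_true, beq_iff_eq] at this
      exact absurd this.2.1 (by simpa using hc0)
    · have he0 : i + 1 = 0 := by omega
      rw [he0, pyGet?_pos cs 0 (by omega) (by omega)] at hg1
      simp only [Int.toNat_zero] at hg1
      have := head_zero_of_takeWhile_pos cs hd.2.1
      rw [this] at hg1
      exact absurd (by injection hg1 with h; exact h.symm) (by simpa using hc0 : ¬ c' = '0')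
  | case5 i hlt hlt1 c' hg1 hc1 hc0 hg ih =>
    intro hlo hhi hd
    simp only [ne_eq, not_not] at hc0
    subst hc0
    rw [nulls_loop]
    simp only [hlt, hg, hlt1, dif_pos, if_true, hg1]
    rw [if_neg (by decide), if_neg (by simp)]
    by_cases hneg : i + 1 < 0
    · have e1 : ((cs.length : Int) + (i+1)).toNat = ((cs.length : Int) + i).toNat + 1 := by omega
      have h1 : cs.drop ((cs.length : Int) + i).toNat
          = '0' :: cs.drop (((cs.length : Int) + i).toNat + 1) :=
        drop_cons_of_get? _ _ _ (by rw [← pyGet?_neg cs i hlo hhi]; exact hg)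
      have hd1 : Dl cs (i+1) := by
        refine ⟨?_, hd.2⟩
        have := hd.1
        rw [h1] at this
        simp only [List.all_cons, Bool.and_eq_true] at this
        rw [e1]
        exact this.2
      exact ih (by omega) hneg hd1
    · have he0 : i + 1 = 0 := by omega
      rw [he0, pos_eq cs 0 (by omega)]
      simp only [Int.toNat_zero, List.drop_zero]
      rw [altF_eval, if_pos hd.2]
      omega
  | case6 i hlt hlt1 hg ih =>
    intro hlo hhi _
    omega
  | case7 i hlt c hg hc =>
    intro hlo hhi hd
    exfalso
    have h1 : cs.drop ((cs.length : Int) + i).toNat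
        = c :: cs.drop (((cs.length : Int) + i).toNat + 1) :=
      drop_cons_of_get? _ _ _ (by rw [← pyGet?_neg cs i hlo hhi]; exact hg)
    have := hd.1
    rw [h1] at this
    simp only [List.all_cons, Bool.and_eq_true, beq_iff_eq] at this
    exact hc this.1
  | case8 i hlt =>
    intro hlo hhi _
    omega

-- evaluating A at the difference witness
lemma nulls_at_witness : nulls "010" (-1) = 1 := by
  have h : "010".toList = ['0', '1', '0'] := rfl
  show nulls_loop "010".toList (-1) = 1
  rw [h]
  rw [nulls_loop]; simp [PySem.List.pyGet?, PySem.List.pyIdx?]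
  rw [nulls_loop]; simp [PySem.List.pyGet?, PySem.List.pyIdx?]

-- ===== VERDICT (by name: the statement is the Claim_ definition above) =====
theorem nulls_spec : Claim_unchanged_nulls := by
  intro s i _ hpre hnd
  show nulls_loop s.toList i = nulls_altF (PySem.List.slice s.toList (some i) none) i
  by_cases h0 : 0 ≤ i
  · rw [PySem.List.slice_from _ h0]
    exact pos_eq s.toList i h0
  · have hlo : -(s.toList.length : Int) ≤ i := by
      rcases hpre with h | h
      · exact h
      · omega
    rw [PySem.List.slice_some_none, clamp_neg s.toList i hlo (by omega)]
    exact neg_nD s.toList i hlo (by omega)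
      (fun hDl => hnd ((D_iff s i).mpr ⟨hlo, by omega, hDl⟩))

theorem nulls_changed : Claim_changed_nulls := by
  unfold Claim_changed_nulls
  refine ⟨by decide, by decide, by decide, nulls_at_witness, by decide, by decide⟩

theorem nulls_tight : Claim_exact_nulls := by
  intro s i _ _ hD
  obtain ⟨hlo, hhi, hDl⟩ := (D_iff s i).mp hD
  have hA : nulls s i = ((s.toList.takeWhile (· == '0')).length : Int) :=
    neg_D s.toList i hlo hhi hDl
  have hB : nulls_alt s i = 0 := by
    show nulls_altF (PySem.List.slice s.toList (some i) none) i = 0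
    rw [PySem.List.slice_some_none, clamp_neg s.toList i hlo hhi]
    exact altF_all_zero _ i hDl.1
  rw [hA, hB]
  have := hDl.2.1
  omega
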